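-- pv_equiv track=rewrite | github.com/4DNucleome/PartSeg | package/PartSegImage/image.py | _prepare_channel_names
-- ===== SOURCE A (Python) =====
-- from collections.abc import Iterable
--
-- def _prepare_channel_names(channel_names, channels_num) -> list[str]:
--     default_channel_names = [f"channel {i + 1}" for i in range(channels_num)]
--     if isinstance(channel_names, str):
--         channel_names = [channel_names]
--     if isinstance(channel_names, Iterable):
--         channel_names_list = [str(x) for x in channel_names]
--         channel_names_list = channel_names_list[:channels_num] + default_channel_names[len(channel_names_list) :]
--     else:
--         channel_names_list = default_channel_names
--     return channel_names_list[:channels_num]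
-- ===== SOURCE B (Python) =====
-- from collections.abc import Iterable
--
-- _MISSING = object()
--
--
-- def _prepare_channel_names(channel_names, channels_num) -> list[str]:
--     if isinstance(channel_names, str):
--         names = iter((channel_names,))
--     elif isinstance(channel_names, Iterable):
--         names = iter(channel_names)
--     else:
--         names = iter(())
--     result = []
--     for i in range(channels_num):
--         nxt = next(names, _MISSING)
--         result.append(f"channel {i + 1}" if nxt is _MISSING else str(nxt))
--     return result
-- ===== Notes on version B (the rewrite author's own statement) =====
-- stated objective: alternative
-- what changed: B streams the source through an iterator in one accumulator loop, emitting next(names) or the default label per step, instead of A's staged pipeline that materializes a full defaults list, a converted copy of the names, and then slices and concatenates them; B never builds a defaults list or slices anything.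
-- intended difference: For negative channels_num with len(channel_names) + 2*channels_num > 0, A's repeated negative slicing returns a nonempty prefix of the provided names (e.g. ['a'] for (['a','b','c'], -1)), while B returns [] as range(channels_num) is empty; an empty channel list is the intended result for a non-positive channel count. — e.g. on _prepare_channel_names(["a", "b", "c"], -1): A returns ["a"], B returns []
import Mathlib
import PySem

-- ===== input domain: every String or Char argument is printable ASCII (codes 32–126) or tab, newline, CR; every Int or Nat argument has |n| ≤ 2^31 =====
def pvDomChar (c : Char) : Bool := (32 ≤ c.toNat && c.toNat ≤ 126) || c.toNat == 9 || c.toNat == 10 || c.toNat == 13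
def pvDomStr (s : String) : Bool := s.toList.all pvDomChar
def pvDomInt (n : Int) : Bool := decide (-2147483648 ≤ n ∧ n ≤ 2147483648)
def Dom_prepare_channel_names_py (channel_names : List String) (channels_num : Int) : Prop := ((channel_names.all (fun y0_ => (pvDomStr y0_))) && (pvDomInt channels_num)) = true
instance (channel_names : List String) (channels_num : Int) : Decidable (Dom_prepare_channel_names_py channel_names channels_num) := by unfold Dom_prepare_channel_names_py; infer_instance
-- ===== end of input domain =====

-- B streams the names through an iterator in one accumulator loop (next-or-default per step)
-- instead of A's materialize-defaults / convert / slice-and-concatenate pipeline (objective: alternative).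

-- f"channel {i + 1}"  (shared f-string of both Pythons; built on List Char so the kernel can reduce it)
def pyChannelLabel (i : Int) : String := String.ofList ("channel ".toList ++ PySem.Int.toChars (i + 1))

-- ===== PORT A =====
def prepare_channel_names_py (channel_names : List String) (channels_num : Int) : List String :=
  let default_channel_names := (PySem.List.pyRange 0 channels_num 1).map (fun i => pyChannelLabel i)
  -- channel_names : List String, so the Iterable branch is taken and str(x) = x
  let channel_names_list := channel_names.map (fun x => x)
  let channel_names_list2 :=
    PySem.List.slice channel_names_list none (some channels_num) ++
      PySem.List.slice default_channel_names (some (channel_names_list.length : Int)) none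
  PySem.List.slice channel_names_list2 none (some channels_num)

-- ===== PORT B =====
-- the for-loop of Source B: state = (remaining iterator contents, result accumulator);
-- each step pops next(names) if any, else appends the default label for index i
def prepare_channel_names_py_alt (channel_names : List String) (channels_num : Int) : List String :=
  ((PySem.List.pyRange 0 channels_num 1).foldl
    (fun (st : List String × List String) i =>
      match st.1 with
      | [] => ([], st.2 ++ [pyChannelLabel i])
      | x :: rest => (rest, st.2 ++ [x]))   -- str(x) = x on List String
    (channel_names, [])).2

-- ===== PRECONDITION & SPEC =====
-- For negative channels_num with channel_names.length + 2*channels_num > 0, A's repeated negative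
-- slicing returns a nonempty prefix of the provided names; B returns [] (range of a negative count is
-- empty), the intended result for a non-positive channel count.
def D_prepare_channel_names_py (channel_names : List String) (channels_num : Int) : Prop :=
  channels_num < 0 ∧ 0 < (channel_names.length : Int) + 2 * channels_num
instance (channel_names : List String) (channels_num : Int) : Decidable (D_prepare_channel_names_py channel_names channels_num) := by unfold D_prepare_channel_names_py; infer_instance

def Spec_prepare_channel_names_py (channel_names : List String) (channels_num : Int) (out : List String) : Prop := ¬ D_prepare_channel_names_py channel_names channels_num → out = prepare_channel_names_py_alt channel_names channels_num
instance (channel_names : List String) (channels_num : Int) (out : List String) : Decidable (Spec_prepare_channel_names_py channel_names channels_num out) := by unfold Spec_prepare_channel_names_py; infer_instance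

def pvDiffWitness_prepare_channel_names_py : List String × Int := (["a", "b", "c"], -1)
def pvDiffWitnessOut_prepare_channel_names_py : (List String) × (List String) := (["a"], [])

-- ===== CLAIM (what is proved, stated in full; the proofs are below) =====
def Claim_unchanged_prepare_channel_names_py : Prop := ∀ (channel_names : List String) (channels_num : Int), Dom_prepare_channel_names_py channel_names channels_num → Spec_prepare_channel_names_py channel_names channels_num (prepare_channel_names_py channel_names channels_num)
def Claim_changed_prepare_channel_names_py : Prop := Dom_prepare_channel_names_py (pvDiffWitness_prepare_channel_names_py.1) (pvDiffWitness_prepare_channel_names_py.2) ∧ D_prepare_channel_names_py (pvDiffWitness_prepare_channel_names_py.1) (pvDiffWitness_prepare_channel_names_py.2) ∧ prepare_channel_names_py (pvDiffWitness_prepare_channel_names_py.1) (pvDiffWitness_prepare_channel_names_py.2) = pvDiffWitnessOut_prepare_channel_names_py.1 ∧ prepare_channel_names_py_alt (pvDiffWitness_prepare_channel_names_py.1) (pvDiffWitness_prepare_channel_names_py.2) = pvDiffWitnessOut_prepare_channel_names_py.2 ∧ pvDiffWitnessOut_prepare_channel_names_py.1 ≠ pvDiffWitnessOut_prepare_ch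annel_names_py.2
def Claim_exact_prepare_channel_names_py : Prop := ∀ (channel_names : List String) (channels_num : Int), Dom_prepare_channel_names_py channel_names channels_num → D_prepare_channel_names_py channel_names channels_num → prepare_channel_names_py channel_names channels_num ≠ prepare_channel_names_py_alt channel_names channels_num

-- ===== LEMMAS AND PROOFS =====

-- what the loop of B emits, as a pure function: pop a provided name while any remain, else the label
def pcnOut : List Int → List String → List String
  | [], _ => []
  | j :: js, [] => pyChannelLabel j :: pcnOut js []
  | _ :: js, x :: xs => x :: pcnOut js xs

theorem foldl_pcn (js : List Int) (rem acc : List String) :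
    ((js.foldl
      (fun (st : List String × List String) i =>
        match st.1 with
        | [] => ([], st.2 ++ [pyChannelLabel i])
        | x :: rest => (rest, st.2 ++ [x])) (rem, acc))).2 = acc ++ pcnOut js rem := by
  induction js generalizing rem acc with
  | nil => simp [pcnOut]
  | cons j js ih =>
    cases rem with
    | nil => simp [List.foldl_cons, ih, pcnOut]
    | cons x xs => simp [List.foldl_cons, ih, pcnOut]

theorem pcnOut_eq (js : List Int) (rem : List String) :
    pcnOut js rem = rem.take js.length ++ (js.drop rem.length).map pyChannelLabel := by
  induction js generalizing rem with
  | nil => simp [pcnOut]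
  | cons j js ih =>
    cases rem with
    | nil => simp [pcnOut, ih]
    | cons x xs => simp [pcnOut, ih]

theorem alt_eq (channel_names : List String) (channels_num : Int) :
    prepare_channel_names_py_alt channel_names channels_num
      = channel_names.take channels_num.toNat ++
          ((PySem.List.pyRange 0 channels_num 1).drop channel_names.length).map pyChannelLabel := by
  unfold prepare_channel_names_py_alt
  rw [foldl_pcn, pcnOut_eq, PySem.List.length_pyRange_one]
  simp

theorem unchanged_aux (channel_names : List String) (channels_num : Int)
    (h : ¬ D_prepare_channel_names_py channel_names channels_num) :
    prepare_channel_names_py channel_names channels_num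
      = prepare_channel_names_py_alt channel_names channels_num := by
  rw [alt_eq]
  simp only [prepare_channel_names_py, List.map_id']
  rcases lt_or_ge channels_num 0 with hn | hn
  · -- negative count outside D_: both sides are []
    have hk : 0 < (-channels_num).toNat := by omega
    rw [Int.toNat_of_nonpos hn.le, List.take_zero,
      PySem.List.pyRange_one_eq_nil hn.le]
    simp only [List.map_nil, List.drop_nil, List.nil_append]
    rw [PySem.List.slice_from_natCast, List.drop_nil, List.append_nil]
    rw [show channels_num = -(((-channels_num).toNat : Nat) : Int) by omega,
      PySem.List.slice_to_neg_natCast _ _ hk, PySem.List.slice_to_neg_natCast _ _ hk]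
    rw [List.take_eq_nil_iff]
    left
    simp only [List.length_take]
    unfold D_prepare_channel_names_py at h
    omega
  · -- 0 ≤ channels_num: A's outer slice is a take of a length-n list, a no-op
    rw [PySem.List.slice_to _ hn, PySem.List.slice_to _ hn, PySem.List.slice_from_natCast,
      ← List.map_drop]
    apply List.take_of_length_le
    simp only [List.length_append, List.length_take, List.length_map, List.length_drop,
      PySem.List.length_pyRange_one]
    omega

theorem exact_aux (channel_names : List String) (channels_num : Int)
    (h : D_prepare_channel_names_py channel_names channels_num) :
    prepare_channel_names_py channel_names channels_num
      ≠ prepare_channel_names_py_alt channel_names channels_num := by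
  obtain ⟨hn, hl⟩ := h
  rw [alt_eq]
  simp only [prepare_channel_names_py, List.map_id']
  have hk : 0 < (-channels_num).toNat := by omega
  rw [Int.toNat_of_nonpos hn.le, List.take_zero,
    PySem.List.pyRange_one_eq_nil hn.le]
  simp only [List.map_nil, List.drop_nil, List.nil_append]
  rw [PySem.List.slice_from_natCast, List.drop_nil, List.append_nil]
  rw [show channels_num = -(((-channels_num).toNat : Nat) : Int) by omega,
    PySem.List.slice_to_neg_natCast _ _ hk, PySem.List.slice_to_neg_natCast _ _ hk]
  intro hEq
  have := congrArg List.length hEq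
  simp only [List.length_take, List.length_nil] at this
  omega

-- ===== VERDICT (by name: the statement is the Claim_ definition above) =====
theorem prepare_channel_names_py_spec : Claim_unchanged_prepare_channel_names_py := by
  intro L n _ h
  exact unchanged_aux L n h

theorem prepare_channel_names_py_changed : Claim_changed_prepare_channel_names_py := by
  unfold Claim_changed_prepare_channel_names_py; decide

theorem prepare_channel_names_py_tight : Claim_exact_prepare_channel_names_py := by
  intro L n _ h
  exact exact_aux L n h
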